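-- pv_equiv track=rewrite | github.com/dennisbiber/sociopathy | graphModel.py | reorganizePatterns
-- ===== SOURCE A (Python) =====
-- def reorganizePatterns(patterns):
--     p1 = []
--     p2 = []
--     p3 = []
--     p4 = []
--     for x in range(len(patterns)):
--         for y in range(len(patterns[x])):
--             if y == 0:
--                 p1.append(patterns[x][y][0])
--                 p1.append(patterns[x][y][-1])
--             elif y == 1:
--                 p2.append(patterns[x][y][0])
--                 p2.append(patterns[x][y][-1])
--             elif y == 2:
--                 p3.append(patterns[x][y][0])
--                 p3.append(patterns[x][y][-1])
--             elif y == 3: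
--                 p4.append(patterns[x][y][0])
--                 p4.append(patterns[x][y][-1])
--
--     return p1, p2, p3, p4
-- ===== SOURCE B (Python) =====
-- def reorganizePatterns(patterns):
--     tagged = [(y, v)
--               for p in patterns
--               for y, row in enumerate(p[:4])
--               for v in (row[0], row[-1])]
--     return tuple([v for t, v in tagged if t == k] for k in range(4))
-- ===== Notes on version B (the rewrite author's own statement) =====
-- stated objective: alternative
-- what changed: B is a two-stage pipeline: first flatten all patterns into one tagged stream of (bucket-index, value) pairs via enumerate over each row truncated to its first 4 entries, then partition that stream into the four buckets by filtering on the tag; A instead mutates four accumulators in a single row-major pass with an if/elif dispatch.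
import Mathlib
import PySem

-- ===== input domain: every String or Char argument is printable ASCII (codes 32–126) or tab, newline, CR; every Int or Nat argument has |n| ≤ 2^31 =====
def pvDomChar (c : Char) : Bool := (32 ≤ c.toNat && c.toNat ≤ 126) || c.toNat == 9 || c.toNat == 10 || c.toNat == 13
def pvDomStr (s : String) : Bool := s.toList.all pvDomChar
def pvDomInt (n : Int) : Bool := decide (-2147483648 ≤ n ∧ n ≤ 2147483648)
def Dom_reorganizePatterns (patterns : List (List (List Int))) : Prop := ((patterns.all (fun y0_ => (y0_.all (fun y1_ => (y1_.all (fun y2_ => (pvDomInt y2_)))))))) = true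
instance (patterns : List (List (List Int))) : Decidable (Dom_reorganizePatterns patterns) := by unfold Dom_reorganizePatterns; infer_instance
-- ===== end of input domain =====

-- B replaces A's single row-major pass with if/elif dispatch by a two-stage pipeline: flatten to one tagged (index, value) stream, then partition it into the four buckets by filtering on the tag (alternative decomposition, same cost). Pre_ excludes inputs where Python A raises IndexError.


-- ===== PORT A =====
-- inner-loop body: for y in range(len(row)), if/elif dispatch on y appending row[y][0], row[y][-1]
def pvStepA (row : List (List Int)) (acc : List Int × List Int × List Int × List Int) (y : Nat) :
    List Int × List Int × List Int × List Int :=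
  let v := (PySem.List.pyGet? row (y : Int)).getD []
  let f := (PySem.List.pyGet? v 0).getD 0
  let l := (PySem.List.pyGet? v (-1)).getD 0
  if y = 0 then (acc.1 ++ [f, l], acc.2.1, acc.2.2.1, acc.2.2.2)
  else if y = 1 then (acc.1, acc.2.1 ++ [f, l], acc.2.2.1, acc.2.2.2)
  else if y = 2 then (acc.1, acc.2.1, acc.2.2.1 ++ [f, l], acc.2.2.2)
  else if y = 3 then (acc.1, acc.2.1, acc.2.2.1, acc.2.2.2 ++ [f, l])
  else acc

def reorganizePatterns (patterns : List (List (List Int))) : List Int × List Int × List Int × List Int :=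
  patterns.foldl (fun acc row => (List.range row.length).foldl (pvStepA row) acc) ([], [], [], [])

-- ===== PORT B =====
-- stage 1: one tagged stream of (bucket index, value) pairs — row[0] then row[-1] for each indexed row of p[:4]
def pvTagged (patterns : List (List (List Int))) : List (Int × Int) :=
  patterns.flatMap (fun p =>
    (PySem.List.enumerate (p.take 4)).flatMap (fun yr =>
      [(yr.1, (PySem.List.pyGet? yr.2 0).getD 0), (yr.1, (PySem.List.pyGet? yr.2 (-1)).getD 0)]))

-- stage 2: partition the stream by tag
def pvBucket (tagged : List (Int × Int)) (k : Int) : List Int :=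
  (tagged.filter (fun t => t.1 == k)).map (·.2)

def reorganizePatterns_alt (patterns : List (List (List Int))) : List Int × List Int × List Int × List Int :=
  let tagged := pvTagged patterns
  (pvBucket tagged 0, pvBucket tagged 1, pvBucket tagged 2, pvBucket tagged 3)

-- ===== PRECONDITION & SPEC =====
-- Pre_ excludes exactly the inputs on which Python A raises IndexError: a row whose
-- first min(len,4) inner lists contain an empty list (pattern[x][y][0] then fails).
def Pre_reorganizePatterns (patterns : List (List (List Int))) : Prop :=
  ∀ row ∈ patterns, ∀ v ∈ row.take 4, v ≠ []
instance (patterns : List (List (List Int))) : Decidable (Pre_reorganizePatterns patterns) := by unfold Pre_reorganizePatterns; infer_instance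
def pvWitness_reorganizePatterns : List (List (List Int)) := [[[1, 2], [3]], [[4], [5, 6], [7], [8], [9]]]

def Spec_reorganizePatterns (patterns : List (List (List Int))) (out : List Int × List Int × List Int × List Int) : Prop := out = reorganizePatterns_alt patterns
instance (patterns : List (List (List Int))) (out : List Int × List Int × List Int × List Int) : Decidable (Spec_reorganizePatterns patterns out) := by unfold Spec_reorganizePatterns; infer_instance

-- ===== CLAIM (what is proved, stated in full; the proofs are below) =====
def Claim_equal_reorganizePatterns : Prop := ∀ (patterns : List (List (List Int))), Dom_reorganizePatterns patterns → Pre_reorganizePatterns patterns → Spec_reorganizePatterns patterns (reorganizePatterns patterns)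

-- ===== LEMMAS AND PROOFS =====

-- the pair appended to bucket i by row `row` (empty when the index is absent)
def pvExt (row : List (List Int)) (i : Nat) : List Int :=
  if i < row.length then
    let v := (PySem.List.pyGet? row (i : Int)).getD []
    [(PySem.List.pyGet? v 0).getD 0, (PySem.List.pyGet? v (-1)).getD 0]
  else []

def pvExtN (row : List (List Int)) (i n : Nat) : List Int :=
  if i < n then
    let v := (PySem.List.pyGet? row (i : Int)).getD []
    [(PySem.List.pyGet? v 0).getD 0, (PySem.List.pyGet? v (-1)).getD 0]
  else []

-- A's inner range-loop characterised
theorem pvInner (row : List (List Int)) (n : Nat)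
    (acc : List Int × List Int × List Int × List Int) :
    (List.range n).foldl (pvStepA row) acc =
      (acc.1 ++ pvExtN row 0 (min n 4), acc.2.1 ++ pvExtN row 1 (min n 4),
       acc.2.2.1 ++ pvExtN row 2 (min n 4), acc.2.2.2 ++ pvExtN row 3 (min n 4)) := by
  induction n generalizing acc with
  | zero => simp [pvExtN]
  | succ n ih =>
      rw [List.range_succ, List.foldl_append, ih]
      simp only [List.foldl_cons, List.foldl_nil]
      rcases acc with ⟨p1, p2, p3, p4⟩
      by_cases h4 : n < 4
      · interval_cases n <;> simp [pvStepA, pvExtN]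
      · have h0 : n ≠ 0 := by omega
        have h1 : n ≠ 1 := by omega
        have h2 : n ≠ 2 := by omega
        have h3 : n ≠ 3 := by omega
        have hm : min (n + 1) 4 = min n 4 := by omega
        simp [pvStepA, h0, h1, h2, h3, hm]

theorem pvExtN_min (row : List (List Int)) (i : Nat) (hi : i < 4) :
    pvExtN row i (min row.length 4) = pvExt row i := by
  simp only [pvExtN, pvExt]
  split <;> split <;> first | rfl | omega

-- A's whole loop: four column lists, expressed as flatMaps
theorem pvMain (ps : List (List (List Int))) (acc : List Int × List Int × List Int × List Int) :
    ps.foldl (fun acc row => (List.range row.length).foldl (pvStepA row) acc) acc =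
      (acc.1 ++ ps.flatMap (fun p => pvExt p 0), acc.2.1 ++ ps.flatMap (fun p => pvExt p 1),
       acc.2.2.1 ++ ps.flatMap (fun p => pvExt p 2), acc.2.2.2 ++ ps.flatMap (fun p => pvExt p 3)) := by
  induction ps generalizing acc with
  | nil => simp
  | cons h t ih =>
      simp only [List.foldl_cons, List.flatMap_cons]
      rw [pvInner, ih]
      simp [pvExtN_min h 0 (by omega), pvExtN_min h 1 (by omega),
            pvExtN_min h 2 (by omega), pvExtN_min h 3 (by omega)]

-- filtering the tagged stream of one enumerate picks out exactly the entry with tag k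
theorem pvPick (l : List (List Int)) (s k : Int) :
    ((((PySem.List.enumerate l s).flatMap (fun yr =>
        [(yr.1, (PySem.List.pyGet? yr.2 0).getD 0), (yr.1, (PySem.List.pyGet? yr.2 (-1)).getD 0)])).filter
        (fun t => t.1 == k)).map (·.2)) =
      if s ≤ k then
        (l[(k - s).toNat]?.elim []
          (fun v => [(PySem.List.pyGet? v 0).getD 0, (PySem.List.pyGet? v (-1)).getD 0]))
      else [] := by
  induction l generalizing s with
  | nil => simp [PySem.List.enumerate_nil]
  | cons x l ih =>
      rw [PySem.List.enumerate_cons]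
      simp only [List.flatMap_cons, List.filter_append, List.map_append, ih (s + 1)]
      by_cases hk : s = k
      · subst hk
        have h1 : ¬ (s + 1 ≤ s) := by omega
        simp [h1]
      · by_cases h2 : s + 1 ≤ k
        · have h3 : s ≤ k := by omega
          have h4 : (k - s).toNat = (k - (s + 1)).toNat + 1 := by omega
          simp [hk, h2, h3, h4]
        · have h3 : ¬ (s ≤ k) := by omega
          simp [hk, h2, h3]

-- a bucket of the tagged stream is the corresponding column flatMap
theorem pvBucket_eq (ps : List (List (List Int))) (k : Nat) (hk : k < 4) :
    pvBucket (pvTagged ps) (k : Int) = ps.flatMap (fun p => pvExt p k) := by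
  unfold pvBucket pvTagged
  rw [List.filter_flatMap, List.map_flatMap]
  apply List.flatMap_congr
  intro p _
  rw [pvPick (p.take 4) 0 k]
  have h0 : (0 : Int) ≤ (k : Int) := by omega
  simp only [h0, if_true, Int.sub_zero, Int.toNat_natCast]
  unfold pvExt
  by_cases h : k < p.length
  · rw [List.getElem?_take_of_lt hk, List.getElem?_eq_getElem h]
    simp [h]
  · have h2 : (p.take 4)[k]? = none := by
      rw [List.getElem?_eq_none_iff]
      simp; omega
    simp [h2, h]

-- ===== VERDICT (by name: the statement is the Claim_ definition above) =====
theorem reorganizePatterns_spec : Claim_equal_reorganizePatterns := by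
  intro patterns _ _
  unfold Spec_reorganizePatterns reorganizePatterns reorganizePatterns_alt
  rw [pvMain]
  simp only [List.nil_append]
  rw [show ((0:Int)) = ((0:Nat):Int) from rfl, pvBucket_eq patterns 0 (by omega),
      show ((1:Int)) = ((1:Nat):Int) from rfl, pvBucket_eq patterns 1 (by omega),
      show ((2:Int)) = ((2:Nat):Int) from rfl, pvBucket_eq patterns 2 (by omega),
      show ((3:Int)) = ((3:Nat):Int) from rfl, pvBucket_eq patterns 3 (by omega)]
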